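-- pv_equiv track=rewrite | github.com/GusEscanda/rubik-cube-solver | varios.py | rangoFC
-- ===== SOURCE A (Python) =====
-- def rangoFC(rangoFilas, rangoColumnas, inc=(0, 0)):
--     # rangoFilas: tupla (desde, hasta)
--     # rangoColumnas: tupla (desde, hasta)
--     # inc: tupla (incremento fila, incremento columna)
--     # devuelve una lista de tuplas (i,j) que resultan de recorrer todo el rango por filas
--     # - para cada coordenada, si desde < hasta recorre esa coordenada en forma descendente
--     # - el incremento por defecto para cada coordenada es 1, -1 o 0 segun se necesite
--     # - si para alguna coordenada el incremento se explicita incompatible con la relacion desde-hasta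
--     #   se toma 1, -1 o 0
--     iDesde, iHasta = rangoFilas
--     jDesde, jHasta = rangoColumnas
--     if iDesde < iHasta:
--         i = 1 if not inc[0] else inc[0]
--         i = i if i > 0 else -i
--     elif iDesde > iHasta:
--         i = -1 if not inc[0] else inc[0]
--         i = i if i < 0 else -i
--     else:
--         i = 0
--     if jDesde < jHasta:
--         j = 1 if not inc[1] else inc[1]
--         j = j if j > 0 else -j
--     elif jDesde > jHasta:
--         j = -1 if not inc[1] else inc[1]
--         j = j if j < 0 else -j
--     else:
--         j = 0
--     inc = (i, j)
--     ret = []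
--     i = iDesde
--     while i >= min(iDesde, iHasta) and i <= max(iDesde, iHasta):
--         j = jDesde
--         while j >= min(jDesde, jHasta) and j <= max(jDesde, jHasta):
--             ret.append((i, j))
--             if inc[1]:
--                 j = j + inc[1]
--             else:
--                 break
--         if inc[0]:
--             i = i + inc[0]
--         else:
--             break
--     return ret
-- ===== SOURCE B (Python) =====
-- def _step(desde, hasta, s):
--     if desde == hasta:
--         return 0
--     m = abs(s) if s else 1
--     return m if desde < hasta else -m
--
-- def rangoFC(rangoFilas, rangoColumnas, inc=(0, 0)):
--     # Flat closed-form enumeration: count the visits per axis, then map every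
--     # flat index k in range(nr*nc) to its coordinate by divmod arithmetic.
--     iDesde, iHasta = rangoFilas
--     jDesde, jHasta = rangoColumnas
--     si = _step(iDesde, iHasta, inc[0])
--     sj = _step(jDesde, jHasta, inc[1])
--     nr = 1 if si == 0 else abs(iHasta - iDesde) // abs(si) + 1
--     nc = 1 if sj == 0 else abs(jHasta - jDesde) // abs(sj) + 1
--     return [(iDesde + k // nc * si, jDesde + k % nc * sj) for k in range(nr * nc)]
-- ===== Notes on version B (the rewrite author's own statement) =====
-- stated objective: alternative
-- what changed: Replaced the interleaved nested while-loops by a closed-form enumeration: compute the visit count of each axis arithmetically (abs(hasta-desde)//abs(step)+1), then map each flat index k of a single range(nr*nc) to its coordinate pair by divmod index arithmetic.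
import Mathlib
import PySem

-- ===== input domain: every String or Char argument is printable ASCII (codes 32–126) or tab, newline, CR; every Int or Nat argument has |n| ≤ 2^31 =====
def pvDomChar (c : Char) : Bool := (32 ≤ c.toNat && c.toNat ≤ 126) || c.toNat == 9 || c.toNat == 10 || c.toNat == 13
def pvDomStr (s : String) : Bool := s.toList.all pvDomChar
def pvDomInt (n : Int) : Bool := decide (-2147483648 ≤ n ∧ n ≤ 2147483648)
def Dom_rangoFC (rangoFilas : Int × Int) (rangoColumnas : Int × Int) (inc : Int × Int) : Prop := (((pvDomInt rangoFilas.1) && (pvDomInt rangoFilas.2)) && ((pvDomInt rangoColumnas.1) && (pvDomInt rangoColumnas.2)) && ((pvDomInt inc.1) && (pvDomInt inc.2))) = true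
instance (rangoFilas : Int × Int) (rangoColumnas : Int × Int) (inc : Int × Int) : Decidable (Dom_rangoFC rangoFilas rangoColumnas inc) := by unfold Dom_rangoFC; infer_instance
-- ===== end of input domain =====

-- B replaces A's interleaved nested while loops by a closed-form enumeration: it counts the
-- visits per axis arithmetically and maps each flat index k of one range(nr*nc) to its
-- coordinate pair by divmod index arithmetic (objective: alternative).

-- ===== PORT A =====
-- step normalization for one axis (A's two if-chains have this common shape; default = +1 or -1)
def pvNorm (desde hasta incv : Int) : Int :=
  if desde < hasta then
    let i := if incv = 0 then 1 else incv
    if i > 0 then i else -i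
  else if desde > hasta then
    let i := if incv = 0 then -1 else incv
    if i < 0 then i else -i
  else 0

-- A's while-loop shape, shared by both nesting levels: run the body `g` (which appends to
-- ret), then step by s or break if s = 0; stop when pos leaves [min, max].
def pvSweep {α : Type} (desde hasta s : Int) (g : List α → Int → List α)
    (ret : List α) (pos : Int) : List α :=
  if h : min desde hasta ≤ pos ∧ pos ≤ max desde hasta then
    let ret' := g ret pos
    if hs : s ≠ 0 then pvSweep desde hasta s g ret' (pos + s) else ret'
  else ret
termination_by (if 0 < s then max desde hasta + 1 - pos else pos - (min desde hasta - 1)).toNat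
decreasing_by
  rcases h with ⟨h1, h2⟩
  split <;> omega

def rangoFC (rangoFilas : Int × Int) (rangoColumnas : Int × Int) (inc : Int × Int) : List (Int × Int) :=
  let iDesde := rangoFilas.1; let iHasta := rangoFilas.2
  let jDesde := rangoColumnas.1; let jHasta := rangoColumnas.2
  let si := pvNorm iDesde iHasta inc.1
  let sj := pvNorm jDesde jHasta inc.2
  pvSweep iDesde iHasta si
    (fun ret i => pvSweep jDesde jHasta sj (fun ret j => ret ++ [(i, j)]) ret jDesde)
    [] iDesde

-- ===== PORT B =====
def pvStep (desde hasta s : Int) : Int :=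
  if desde = hasta then 0
  else
    let m := if s = 0 then 1 else |s|
    if desde < hasta then m else -m

def rangoFC_alt (rangoFilas : Int × Int) (rangoColumnas : Int × Int) (inc : Int × Int) : List (Int × Int) :=
  let iDesde := rangoFilas.1; let iHasta := rangoFilas.2
  let jDesde := rangoColumnas.1; let jHasta := rangoColumnas.2
  let si := pvStep iDesde iHasta inc.1
  let sj := pvStep jDesde jHasta inc.2
  let nr : Int := if si = 0 then 1 else PySem.Int.floordiv |iHasta - iDesde| |si| + 1
  let nc : Int := if sj = 0 then 1 else PySem.Int.floordiv |jHasta - jDesde| |sj| + 1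
  (PySem.List.pyRange 0 (nr * nc) 1).map
    (fun k => (iDesde + PySem.Int.floordiv k nc * si, jDesde + PySem.Int.mod k nc * sj))

-- ===== PRECONDITION & SPEC =====
def Spec_rangoFC (rangoFilas : Int × Int) (rangoColumnas : Int × Int) (inc : Int × Int) (out : List (Int × Int)) : Prop := out = rangoFC_alt rangoFilas rangoColumnas inc
instance (rangoFilas : Int × Int) (rangoColumnas : Int × Int) (inc : Int × Int) (out : List (Int × Int)) : Decidable (Spec_rangoFC rangoFilas rangoColumnas inc out) := by unfold Spec_rangoFC; infer_instance

-- ===== CLAIM (what is proved, stated in full; the proofs are below) =====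
def Claim_equal_rangoFC : Prop := ∀ (rangoFilas : Int × Int) (rangoColumnas : Int × Int) (inc : Int × Int), Dom_rangoFC rangoFilas rangoColumnas inc → Spec_rangoFC rangoFilas rangoColumnas inc (rangoFC rangoFilas rangoColumnas inc)

-- ===== LEMMAS AND PROOFS =====

-- number of positions A visits on one axis, as a Nat
def pvCount (desde hasta s : Int) : Nat :=
  if s = 0 then 1 else (hasta - desde).natAbs / s.natAbs + 1

-- the list of positions A visits on one axis
def pvAxisList (desde hasta s : Int) : List Int :=
  (List.range (pvCount desde hasta s)).map (fun k : Nat => desde + (k : Int) * s)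

lemma pvStep_eq_pvNorm (desde hasta s : Int) : pvStep desde hasta s = pvNorm desde hasta s := by
  unfold pvStep pvNorm
  dsimp only
  rcases lt_trichotomy s 0 with hs | hs | hs
  · rw [abs_of_neg hs]; split_ifs <;> omega
  · subst hs; split_ifs <;> omega
  · rw [abs_of_pos hs]; split_ifs <;> omega

lemma range_succ_map {α : Type} (f : Nat → α) (n : Nat) :
    (List.range (n + 1)).map f = f 0 :: (List.range n).map (fun k => f (k + 1)) := by
  rw [List.range_succ_eq_map]
  simp [List.map_map, Function.comp]

-- ascending sweep: positions pos, pos+s, … up to hasta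
lemma sweep_asc {α : Type} (g : List α → Int → List α) (hbody : Int → List α)
    (hg : ∀ ret p, g ret p = ret ++ hbody p)
    {desde hasta s : Int} (hd : desde < hasta) (hs : 0 < s) :
    ∀ (n : Nat) (pos : Int), (hasta + 1 - pos).toNat ≤ n → desde ≤ pos → pos ≤ hasta → ∀ ret,
      pvSweep desde hasta s g ret pos
        = ret ++ ((List.range ((hasta - pos).toNat / s.toNat + 1)).map
            (fun k : Nat => pos + (k : Int) * s)).flatMap hbody := by
  intro n
  induction n with
  | zero => intro pos hn hp hph ret; omega
  | succ n ih =>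
    intro pos hn hp hph ret
    rw [pvSweep, dif_pos (by constructor <;> omega), dif_pos (show s ≠ 0 by omega), hg]
    by_cases hle : pos + s ≤ hasta
    · have hcount : (hasta - pos).toNat / s.toNat + 1
          = ((hasta - (pos + s)).toNat / s.toNat + 1) + 1 := by
        have h1 : (hasta - pos).toNat = (hasta - (pos + s)).toNat + s.toNat := by omega
        rw [h1, Nat.add_div_right _ (by omega)]
      rw [hcount, range_succ_map, ih (pos + s) (by omega) (by omega) (by omega)]
      simp only [List.flatMap_cons, Int.natCast_zero, zero_mul, add_zero, List.append_assoc]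
      congr 2
      congr 1
      apply List.map_congr_left
      intro k _
      push_cast; ring
    · have hcount : (hasta - pos).toNat / s.toNat + 1 = 1 := by
        have : (hasta - pos).toNat < s.toNat := by omega
        rw [Nat.div_eq_of_lt this]
      rw [pvSweep, dif_neg (by omega), hcount]
      simp
lemma sweep_desc {α : Type} (g : List α → Int → List α) (hbody : Int → List α)
    (hg : ∀ ret p, g ret p = ret ++ hbody p)
    {desde hasta s : Int} (hd : hasta < desde) (hs : s < 0) :
    ∀ (n : Nat) (pos : Int), (pos - (hasta - 1)).toNat ≤ n → pos ≤ desde → hasta ≤ pos → ∀ ret,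
      pvSweep desde hasta s g ret pos
        = ret ++ ((List.range ((pos - hasta).toNat / (-s).toNat + 1)).map
            (fun k : Nat => pos + (k : Int) * s)).flatMap hbody := by
  intro n
  induction n with
  | zero => intro pos hn hp hph ret; omega
  | succ n ih =>
    intro pos hn hp hph ret
    rw [pvSweep, dif_pos (by constructor <;> omega), dif_pos (show s ≠ 0 by omega), hg]
    by_cases hle : hasta ≤ pos + s
    · have hcount : (pos - hasta).toNat / (-s).toNat + 1
          = ((pos + s - hasta).toNat / (-s).toNat + 1) + 1 := by
        have h1 : (pos - hasta).toNat = (pos + s - hasta).toNat + (-s).toNat := by omega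
        rw [h1, Nat.add_div_right _ (by omega)]
      rw [hcount, range_succ_map, ih (pos + s) (by omega) (by omega) (by omega)]
      simp only [List.flatMap_cons, Int.natCast_zero, zero_mul, add_zero, List.append_assoc]
      congr 2
      congr 1
      apply List.map_congr_left
      intro k _
      push_cast; ring
    · have hcount : (pos - hasta).toNat / (-s).toNat + 1 = 1 := by
        have : (pos - hasta).toNat < (-s).toNat := by omega
        rw [Nat.div_eq_of_lt this]
      rw [pvSweep, dif_neg (by omega), hcount]
      simp

-- one full axis sweep, starting at desde with the normalized step, is the flatMap over pvAxisList
lemma sweep_axis {α : Type} (g : List α → Int → List α) (hbody : Int → List α)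
    (hg : ∀ ret p, g ret p = ret ++ hbody p) (desde hasta incv : Int) (ret : List α) :
    pvSweep desde hasta (pvNorm desde hasta incv) g ret desde
      = ret ++ (pvAxisList desde hasta (pvNorm desde hasta incv)).flatMap hbody := by
  set s := pvNorm desde hasta incv with hsdef
  rcases lt_trichotomy desde hasta with hlt | heq | hgt
  · have hs : 0 < s := by
      rw [hsdef]; unfold pvNorm; rw [if_pos hlt]
      by_cases h0 : incv = 0
      · simp [h0]
      · simp only [h0, if_false]
        rcases lt_trichotomy incv 0 with h | h | h
        · rw [if_neg (by omega)]; omega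
        · omega
        · rw [if_pos h]; omega
    have := sweep_asc g hbody hg hlt hs (hasta + 1 - desde).toNat desde le_rfl le_rfl (by omega) ret
    rw [this]
    unfold pvAxisList pvCount
    rw [if_neg (by omega)]
    have e1 : (hasta - desde).toNat = (hasta - desde).natAbs := by omega
    have e2 : s.toNat = s.natAbs := by omega
    rw [e1, e2]
  · have hs : s = 0 := by rw [hsdef]; unfold pvNorm; rw [if_neg (by omega), if_neg (by omega)]
    rw [hs, pvSweep, dif_pos (by constructor <;> omega)]
    unfold pvAxisList pvCount
    simp [hg]
  · have hs : s < 0 := by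
      rw [hsdef]; unfold pvNorm; rw [if_neg (by omega), if_pos hgt]
      by_cases h0 : incv = 0
      · simp [h0]
      · simp only [h0, if_false]
        rcases lt_trichotomy incv 0 with h | h | h
        · rw [if_pos h]; omega
        · omega
        · rw [if_neg (by omega)]; omega
    have := sweep_desc g hbody hg hgt hs (desde - (hasta - 1)).toNat desde le_rfl le_rfl (by omega) ret
    rw [this]
    unfold pvAxisList pvCount
    rw [if_neg (by omega)]
    have e1 : (desde - hasta).toNat = (hasta - desde).natAbs := by omega
    have e2 : (-s).toNat = s.natAbs := by omega
    rw [e1, e2]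

lemma flatMap_single {α β : Type} (f : α → β) (l : List α) :
    l.flatMap (fun x => [f x]) = l.map f := by
  induction l with
  | nil => rfl
  | cons x xs ih => simp [ih]

-- flat divmod indexing over range (a*b) is the Cartesian product of the two ranges
lemma range_mul_divmod {α : Type} (f : Nat → Nat → α) (a b : Nat) (hb : 0 < b) :
    (List.range (a * b)).map (fun k => f (k / b) (k % b))
      = (List.range a).flatMap (fun r => (List.range b).map (fun c => f r c)) := by
  induction a with
  | zero => simp
  | succ a ih =>
    have h1 : (a + 1) * b = a * b + b := by ring
    rw [h1, List.range_add, List.map_append, ih, List.range_succ, List.flatMap_append]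
    congr 1
    simp only [List.map_map, List.flatMap_cons, List.flatMap_nil, List.append_nil]
    apply List.map_congr_left
    intro c hc
    have hcb : c < b := List.mem_range.mp hc
    simp only [Function.comp]
    have e1 : a * b + c = c + a * b := by ring
    rw [e1, Nat.add_mul_div_right _ _ hb, Nat.div_eq_of_lt hcb, Nat.add_mul_mod_self_right,
        Nat.mod_eq_of_lt hcb]
    simp

-- B's per-axis count equals A's visit count
lemma count_eq (desde hasta s : Int) :
    (if s = 0 then (1 : Int) else PySem.Int.floordiv |hasta - desde| |s| + 1)
      = (pvCount desde hasta s : Int) := by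
  unfold pvCount
  by_cases h0 : s = 0
  · simp [h0]
  · rw [if_neg h0, if_neg h0]
    have habs : (0 : Int) < |s| := abs_pos.mpr h0
    rw [PySem.Int.floordiv_eq_ediv_of_pos habs]
    have e1 : |hasta - desde| = ((hasta - desde).natAbs : Int) := (Int.abs_eq_natAbs _)
    have e2 : |s| = (s.natAbs : Int) := (Int.abs_eq_natAbs _)
    rw [e1, e2]
    push_cast [Int.natCast_div]
    ring

-- ===== VERDICT (by name: the statement is the Claim_ definition above) =====
theorem rangoFC_spec : Claim_equal_rangoFC := by
  intro rf rc inc _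
  unfold Spec_rangoFC rangoFC rangoFC_alt
  simp only [pvStep_eq_pvNorm]
  set si := pvNorm rf.1 rf.2 inc.1 with hsi
  set sj := pvNorm rc.1 rc.2 inc.2 with hsj
  -- A's side: nested sweeps = flatMap over the two axis lists
  rw [sweep_axis
        (fun ret i => pvSweep rc.1 rc.2 sj (fun ret j => ret ++ [(i, j)]) ret rc.1)
        (fun i => (pvAxisList rc.1 rc.2 sj).flatMap (fun j => [(i, j)]))
        (fun ret i => sweep_axis _ _ (fun ret p => rfl) rc.1 rc.2 inc.2 ret)
        rf.1 rf.2 inc.1 []]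
  simp only [List.nil_append, flatMap_single]
  -- B's side
  rw [count_eq rf.1 rf.2 si, count_eq rc.1 rc.2 sj]
  have hb : 0 < pvCount rc.1 rc.2 sj := by
    unfold pvCount
    split
    · exact Nat.one_pos
    · exact Nat.succ_pos _
  have hNN : ((pvCount rf.1 rf.2 si : Int)) * ((pvCount rc.1 rc.2 sj : Int))
      = ((pvCount rf.1 rf.2 si * pvCount rc.1 rc.2 sj : Nat) : Int) := by push_cast; ring
  rw [hNN, PySem.List.pyRange_one]
  have htn : (((pvCount rf.1 rf.2 si * pvCount rc.1 rc.2 sj : Nat) : Int) - 0).toNat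
      = pvCount rf.1 rf.2 si * pvCount rc.1 rc.2 sj := by omega
  rw [htn, List.map_map]
  have hdm : ∀ k : Nat,
      ((fun k : Int => (rf.1 + PySem.Int.floordiv k (pvCount rc.1 rc.2 sj : Int) * si,
          rc.1 + PySem.Int.mod k (pvCount rc.1 rc.2 sj : Int) * sj)) ∘ fun k : Nat => (0 : Int) + k) k
        = (fun r c : Nat => (rf.1 + (r : Int) * si, rc.1 + (c : Int) * sj))
            (k / pvCount rc.1 rc.2 sj) (k % pvCount rc.1 rc.2 sj) := by
    intro k
    simp only [Function.comp, zero_add]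
    rw [show ((pvCount rc.1 rc.2 sj : Int)) = ((pvCount rc.1 rc.2 sj : Nat) : Int) from rfl,
        PySem.Int.floordiv_natCast, PySem.Int.mod_natCast]
  rw [List.map_congr_left (fun k _ => hdm k),
      range_mul_divmod (fun r c => (rf.1 + (r : Int) * si, rc.1 + (c : Int) * sj)) _ _ hb]
  unfold pvAxisList
  simp only [List.flatMap_map, List.map_map, Function.comp_def]
  rfl
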